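-- pv_equiv track=rewrite | github.com/therooler/variational_compilation | vff/tn/tebd_quasi_1d.py | snake_index
-- ===== SOURCE A (Python) =====
-- def snake_index(Lx, Ly):
--     dic = {}
--     idx = 0
--     for i in range(Ly):
--         if i % 2 == 0:
--             for j in range(Lx):
--                 dic[(j, i)] = idx
--                 idx += 1
--         else:
--             for j in range(Lx - 1, -1, -1):
--                 dic[(j, i)] = idx
--                 idx += 1
--     return dic
-- ===== SOURCE B (Python) =====
-- def snake_index(Lx, Ly):
--     if Lx <= 0 or Ly <= 0:
--         return {}
--     dic = {}
--     for idx in range(Lx * Ly):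
--         i, p = divmod(idx, Lx)
--         j = p if i % 2 == 0 else Lx - 1 - p
--         dic[(j, i)] = idx
--     return dic
-- ===== Notes on version B (the rewrite author's own statement) =====
-- stated objective: alternative
-- what changed: Replaces the nested row loops with a running counter (and a reversed inner loop on odd rows) by a single flat loop over range(Lx*Ly) that recovers row and column from the index with divmod and computes the snake column by the closed form Lx-1-p on odd rows.
import Mathlib
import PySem

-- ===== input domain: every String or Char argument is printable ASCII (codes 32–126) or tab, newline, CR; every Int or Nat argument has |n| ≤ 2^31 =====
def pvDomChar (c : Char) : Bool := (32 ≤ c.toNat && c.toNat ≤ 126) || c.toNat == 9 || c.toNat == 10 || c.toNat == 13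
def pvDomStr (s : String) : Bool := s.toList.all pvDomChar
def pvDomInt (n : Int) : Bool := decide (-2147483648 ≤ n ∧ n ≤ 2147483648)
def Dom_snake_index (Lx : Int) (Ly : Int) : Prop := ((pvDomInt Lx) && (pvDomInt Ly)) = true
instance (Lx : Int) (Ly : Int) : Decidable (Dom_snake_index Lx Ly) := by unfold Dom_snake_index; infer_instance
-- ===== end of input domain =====

-- B replaces A's nested snake loops with a counter by one flat loop over range(Lx*Ly) using divmod; same cost, different decomposition.


-- ===== PORT A =====
def snake_index (Lx : Int) (Ly : Int) : List (Int × Int × Int) :=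
  let st := (PySem.List.pyRange 0 Ly 1).foldl
    (fun (st : PySem.Dict (Int × Int) Int × Int) i =>
      if PySem.Int.mod i 2 == 0 then
        (PySem.List.pyRange 0 Lx 1).foldl
          (fun st j => (st.1.insert (j, i) st.2, st.2 + 1)) st
      else
        (PySem.List.pyRange (Lx - 1) (-1) (-1)).foldl
          (fun st j => (st.1.insert (j, i) st.2, st.2 + 1)) st)
    (PySem.Dict.empty, 0)
  st.1.items.map (fun e => (e.1.1, e.1.2, e.2))

-- ===== PORT B =====
def snake_index_alt (Lx : Int) (Ly : Int) : List (Int × Int × Int) :=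
  if Lx ≤ 0 ∨ Ly ≤ 0 then []
  else
    let d := (PySem.List.pyRange 0 (Lx * Ly) 1).foldl
      (fun (d : PySem.Dict (Int × Int) Int) idx =>
        let i := PySem.Int.floordiv idx Lx
        let p := PySem.Int.mod idx Lx
        let j := if PySem.Int.mod i 2 == 0 then p else Lx - 1 - p
        d.insert (j, i) idx)
      PySem.Dict.empty
    d.items.map (fun e => (e.1.1, e.1.2, e.2))

-- ===== PRECONDITION & SPEC =====
def Spec_snake_index (Lx : Int) (Ly : Int) (out : List (Int × Int × Int)) : Prop := out = snake_index_alt Lx Ly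
instance (Lx : Int) (Ly : Int) (out : List (Int × Int × Int)) : Decidable (Spec_snake_index Lx Ly out) := by unfold Spec_snake_index; infer_instance

-- ===== CLAIM (what is proved, stated in full; the proofs are below) =====
def Claim_equal_snake_index : Prop := ∀ (Lx : Int) (Ly : Int), Dom_snake_index Lx Ly → Spec_snake_index Lx Ly (snake_index Lx Ly)

-- ===== LEMMAS AND PROOFS =====

-- The key B inserts for a flat index idx.
def pvKeyB (Lx : Int) (idx : Int) : Int × Int :=
  let i := PySem.Int.floordiv idx Lx
  let p := PySem.Int.mod idx Lx
  ((if PySem.Int.mod i 2 == 0 then p else Lx - 1 - p), i)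

-- Closed-form entry k of the snake dict for an x-wide grid.
def pvEntry (x : Nat) (k : Nat) : (Int × Int) × Int :=
  ((if (k / x) % 2 = 0 then ((k % x : Nat) : Int) else (x : Int) - 1 - ((k % x : Nat) : Int),
    ((k / x : Nat) : Int)), (k : Int))

-- The items A's inner loop appends for row i, starting counter idx, over column list js.
def pvRowOut (i idx : Int) : List Int → List ((Int × Int) × Int)
  | [] => []
  | j :: tl => ((j, i), idx) :: pvRowOut i (idx + 1) tl

theorem pvKeyB_inj (Lx : Int) : Function.Injective (pvKeyB Lx) := by
  intro a b h
  simp only [pvKeyB, Prod.mk.injEq] at h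
  obtain ⟨hj, hi⟩ := h
  rw [hi] at hj
  have hp : PySem.Int.mod a Lx = PySem.Int.mod b Lx := by
    split_ifs at hj with h1 <;> omega
  have ha := PySem.Int.floordiv_mul_add_mod a Lx
  have hb := PySem.Int.floordiv_mul_add_mod b Lx
  rw [hi, hp] at ha
  omega

theorem pvRowOut_append (i : Int) (l1 : List Int) (l2 : List Int) (idx : Int) :
    pvRowOut i idx (l1 ++ l2) = pvRowOut i idx l1 ++ pvRowOut i (idx + l1.length) l2 := by
  induction l1 generalizing idx with
  | nil => simp [pvRowOut]
  | cons j tl ih =>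
    simp only [List.cons_append, pvRowOut, ih (idx + 1), List.length_cons]
    rw [show idx + (((tl.length + 1 : Nat)) : Int) = idx + 1 + (tl.length : Int) by push_cast; ring]

theorem pvRowOut_map_range (i idx : Int) (f : Nat → Int) (n : Nat) :
    pvRowOut i idx ((List.range n).map f)
      = (List.range n).map (fun p => ((f p, i), idx + p)) := by
  induction n with
  | zero => simp [pvRowOut]
  | succ n ih =>
    rw [List.range_succ, List.map_append, List.map_append, pvRowOut_append, ih]
    simp [pvRowOut]

theorem pvInnerA (i : Int) (js : List Int) (hnd : js.Nodup)
    (d : PySem.Dict (Int × Int) Int) (idx : Int)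
    (hf : ∀ j ∈ js, d.contains (j, i) = false) :
    js.foldl (fun st j => (st.1.insert (j, i) st.2, st.2 + 1)) (d, idx)
      = (⟨d.items ++ pvRowOut i idx js⟩, idx + js.length) := by
  induction js generalizing d idx with
  | nil => simp [pvRowOut]
  | cons j tl ih =>
    simp only [List.foldl_cons]
    have hfresh : d.contains (j, i) = false := hf j (List.mem_cons_self ..)
    have htl : ∀ j' ∈ tl, (d.insert (j, i) idx).contains (j', i) = false := by
      intro j' hj'
      rw [PySem.Dict.contains_insert]
      have : j' ≠ j := by
        rintro rfl; exact (List.nodup_cons.mp hnd).1 hj'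
      simp [this, hf j' (List.mem_cons_of_mem _ hj')]
    rw [ih (List.nodup_cons.mp hnd).2 _ _ htl,
      PySem.Dict.items_insert_of_not_contains _ _ hfresh]
    simp only [pvRowOut, List.append_assoc, List.singleton_append, List.length_cons,
      Prod.mk.injEq, true_and]
    push_cast; ring

theorem pvB_items (Lx Ly : Int) :
    ((PySem.List.pyRange 0 (Lx * Ly) 1).foldl
      (fun (d : PySem.Dict (Int × Int) Int) idx =>
        let i := PySem.Int.floordiv idx Lx
        let p := PySem.Int.mod idx Lx
        let j := if PySem.Int.mod i 2 == 0 then p else Lx - 1 - p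
        d.insert (j, i) idx)
      PySem.Dict.empty)
      = PySem.Dict.mk ((PySem.List.pyRange 0 (Lx * Ly) 1).map (fun a => (pvKeyB Lx a, a))) := by
  apply PySem.Dict.ext
  have h := PySem.Dict.items_foldl_insert_fresh (l := PySem.List.pyRange 0 (Lx * Ly) 1)
    (k := pvKeyB Lx) (v := fun a => a) (d := PySem.Dict.empty)
    (by intro a _; simp [PySem.Dict.contains_empty])
    ((PySem.List.nodup_pyRange_one 0 (Lx * Ly)).map (pvKeyB_inj Lx))
  simpa [pvKeyB] using h

theorem pvKeyB_cast (x : Nat) (t : Nat) :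
    pvKeyB (x : Int) (t : Int) = (pvEntry x t).1 := by
  have hm2 : PySem.Int.mod ((t / x : Nat) : Int) 2 = (((t / x) % 2 : Nat) : Int) := by
    exact_mod_cast PySem.Int.mod_natCast (t / x) 2
  simp only [pvKeyB, pvEntry, PySem.Int.floordiv_natCast, PySem.Int.mod_natCast, hm2]
  have hb : ((((t / x) % 2 : Nat) : Int) == 0) = decide ((t / x) % 2 = 0) := by
    by_cases h : (t / x) % 2 = 0
    · simp [h]
    · simp [h]
      norm_cast
      omega
  rw [hb]
  by_cases h : (t / x) % 2 = 0 <;> simp [h]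

theorem pvEntry_block (x : Nat) (hx : 0 < x) (y p : Nat) (hp : p < x) :
    pvEntry x (x * y + p)
      = ((if y % 2 = 0 then (p : Int) else (x : Int) - 1 - (p : Int), (y : Int)),
         ((x * y : Nat) : Int) + (p : Int)) := by
  have h1 : (x * y + p) / x = y := by
    rw [Nat.mul_add_div hx, Nat.div_eq_of_lt hp]
    rfl
  have h2 : (x * y + p) % x = p := by
    rw [Nat.add_mod, Nat.mul_mod_right]; simp [Nat.mod_eq_of_lt hp]
  simp only [pvEntry, h1, h2]
  exact Prod.ext rfl (by push_cast; ring)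

-- A's outer fold characterised over Nat-sized grids.
theorem pvA_fold (x : Nat) (hx : 0 < x) (y : Nat) :
    (PySem.List.pyRange 0 (y : Int) 1).foldl
      (fun (st : PySem.Dict (Int × Int) Int × Int) i =>
        if PySem.Int.mod i 2 == 0 then
          (PySem.List.pyRange 0 (x : Int) 1).foldl
            (fun st j => (st.1.insert (j, i) st.2, st.2 + 1)) st
        else
          (PySem.List.pyRange ((x : Int) - 1) (-1) (-1)).foldl
            (fun st j => (st.1.insert (j, i) st.2, st.2 + 1)) st)
      (PySem.Dict.empty, 0)
      = (⟨(List.range (x * y)).map (pvEntry x)⟩, ((x * y : Nat) : Int)) := by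
  induction y with
  | zero =>
    rw [show ((0 : Nat) : Int) = 0 by simp, PySem.List.pyRange_zero]
    simp [PySem.Dict.empty]
  | succ y ih =>
    rw [show ((y + 1 : Nat) : Int) = (y : Int) + 1 by push_cast; ring,
      PySem.List.pyRange_one_succ_right (by omega : (0 : Int) ≤ (y : Int)),
      List.foldl_append, ih]
    simp only [List.foldl_cons, List.foldl_nil]
    have hfresh : ∀ j : Int,
        (PySem.Dict.mk (κ := Int × Int) (ν := Int)
          ((List.range (x * y)).map (pvEntry x))).contains (j, (y : Int)) = false := by
      intro j
      rw [PySem.Dict.contains_mk]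
      simp only [List.any_eq_false]
      intro q hq
      simp only [List.mem_map, List.mem_range] at hq
      obtain ⟨k, hk, rfl⟩ := hq
      have hdiv : k / x < y := Nat.div_lt_of_lt_mul hk
      simp only [pvEntry]
      intro htrue
      have heq := eq_of_beq htrue
      have h2 : ((k / x : Nat) : Int) = ((y : Nat) : Int) := congrArg Prod.snd heq
      exact absurd (by exact_mod_cast h2 : k / x = y) (Nat.ne_of_lt hdiv)
    have hsplit : List.range (x * (y + 1)) = List.range (x * y) ++ (List.range x).map (x * y + ·) := by
      rw [show x * (y + 1) = x * y + x by ring, List.range_add]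
    have hcount : ((x * y : Nat) : Int) + ((x : Nat) : Int) = ((x * (y + 1) : Nat) : Int) := by
      push_cast; ring
    have hmody : PySem.Int.mod (y : Int) 2 = ((y % 2 : Nat) : Int) := by
      exact_mod_cast PySem.Int.mod_natCast y 2
    by_cases hpar : y % 2 = 0
    · rw [show (PySem.Int.mod (y : Int) 2 == 0) = true by rw [hmody, hpar]; simp]
      simp only [if_true]
      have hjs : PySem.List.pyRange 0 (x : Int) 1 = (List.range x).map (fun p => ((p : Nat) : Int)) := by
        rw [PySem.List.pyRange_one]; simp
      rw [hjs, pvInnerA (y : Int) _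
        ((List.nodup_range).map (fun a b h => by exact_mod_cast h))
        _ _ (by intro j _; exact hfresh j), pvRowOut_map_range]
      refine Prod.ext ?_ ?_
      · show PySem.Dict.mk _ = PySem.Dict.mk _
        congr 1
        rw [hsplit, List.map_append, List.map_map]
        congr 1
        apply List.map_congr_left
        intro p hp
        simp only [List.mem_range] at hp
        simp [Function.comp_apply, pvEntry_block x hx y p hp, hpar]
      · show _ = _
        simp only [List.length_map, List.length_range]
        exact hcount
    · rw [show (PySem.Int.mod (y : Int) 2 == 0) = false by
        rw [hmody]; simp only [beq_eq_false_iff_ne, ne_eq, Nat.cast_eq_zero]; omega]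
      simp only [Bool.false_eq_true, if_false]
      have hjs : PySem.List.pyRange ((x : Int) - 1) (-1) (-1)
          = (List.range x).map (fun p : Nat => (x : Int) - 1 - (p : Int)) := by
        rw [PySem.List.pyRange_neg_one]
        have hlen : ((x : Int) - 1 - (-1)).toNat = x := by omega
        rw [hlen]
      rw [hjs, pvInnerA (y : Int) _
        ((List.nodup_range).map (fun a b h => by
          have : (a : Int) = (b : Int) := by omega
          exact_mod_cast this))
        _ _ (by intro j _; exact hfresh j), pvRowOut_map_range]
      refine Prod.ext ?_ ?_
      · show PySem.Dict.mk _ = PySem.Dict.mk _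
        congr 1
        rw [hsplit, List.map_append, List.map_map]
        congr 1
        apply List.map_congr_left
        intro p hp
        simp only [List.mem_range] at hp
        simp [Function.comp_apply, pvEntry_block x hx y p hp, hpar]
      · show _ = _
        simp only [List.length_map, List.length_range]
        exact hcount

-- if every step is the identity, a fold does nothing
theorem pvFoldl_id {α β : Type} (l : List β) (f : α → β → α) (init : α)
    (h : ∀ st b, b ∈ l → f st b = st) : l.foldl f init = init := by
  induction l generalizing init with
  | nil => rfl
  | cons b tl ih =>
    rw [List.foldl_cons, h init b (List.mem_cons_self ..)]
    exact ih init (fun st b' hb' => h st b' (List.mem_cons_of_mem _ hb'))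

theorem pvB_entries (x y : Nat) :
    (PySem.List.pyRange 0 ((x : Int) * (y : Int)) 1).map (fun a => (pvKeyB (x : Int) a, a))
      = (List.range (x * y)).map (pvEntry x) := by
  rw [PySem.List.pyRange_one]
  simp only [sub_zero, List.map_map]
  rw [show ((x : Int) * (y : Int)).toNat = x * y by rw [← Nat.cast_mul, Int.toNat_natCast]]
  apply List.map_congr_left
  intro t _
  simp only [Function.comp_apply, zero_add]
  have h1 := pvKeyB_cast x t
  exact Prod.ext h1 rfl

-- ===== VERDICT =====
theorem snake_index_spec : Claim_equal_snake_index := by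
  intro Lx Ly _
  unfold Spec_snake_index snake_index snake_index_alt
  by_cases hy : Ly ≤ 0
  · rw [PySem.List.pyRange_one_eq_nil hy]
    simp [PySem.Dict.empty, hy]
  · by_cases hx : Lx ≤ 0
    · simp only [hx, true_or, if_pos]
      rw [pvFoldl_id _ _ _ (by
        intro st i _
        rw [PySem.List.pyRange_one_eq_nil hx, PySem.List.pyRange_neg_one_eq_nil (by omega)]
        simp)]
      simp [PySem.Dict.empty]
    · obtain ⟨x, rfl⟩ : ∃ x : Nat, Lx = (x : Int) := ⟨Lx.toNat, by omega⟩
      obtain ⟨y, rfl⟩ : ∃ y : Nat, Ly = (y : Int) := ⟨Ly.toNat, by omega⟩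
      rw [if_neg (by omega)]
      rw [pvA_fold x (by omega) y, pvB_items]
      dsimp only
      rw [pvB_entries x y]
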